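-- pv_equiv track=rewrite | github.com/rulecoconuts/algo_learn | b_tree/class_skeleton_to_tldr_frame.py | find_private_and_public_points
-- ===== SOURCE A (Python) =====
-- from typing import Optional
--
-- def find_private_and_public_points(rawCode: list[str]) -> tuple[Optional[int], Optional[int]]:
--     '''Return the positions of the private and pulic labels, in that order'''
--     private = None
--     public = None
--
--     for index in range(len(rawCode)):
--         rawLine = rawCode[index]
--         line = rawLine.strip()
--         if line == "private:":
--             private = index
--         elif line == "public:":
--             public = index
--
--     return private, public
-- ===== SOURCE B (Python) =====
-- from typing import Optional
--
-- def find_private_and_public_points(rawCode: list[str]) -> tuple[Optional[int], Optional[int]]: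
--     '''Return the positions of the private and pulic labels, in that order'''
--     private = None
--     public = None
--     for index in reversed(range(len(rawCode))):
--         line = rawCode[index].strip()
--         if line == "private:":
--             if private is None:
--                 private = index
--         elif line == "public:":
--             if public is None:
--                 public = index
--         if private is not None and public is not None:
--             break
--     return private, public
-- ===== Notes on version B (the rewrite author's own statement) =====
-- stated objective: alternative
-- what changed: Scans the lines backwards, keeping the first hit for each label (which is A's last occurrence) and breaking out as soon as both labels are found, instead of A's full forward scan that keeps overwriting.
import Mathlib
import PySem

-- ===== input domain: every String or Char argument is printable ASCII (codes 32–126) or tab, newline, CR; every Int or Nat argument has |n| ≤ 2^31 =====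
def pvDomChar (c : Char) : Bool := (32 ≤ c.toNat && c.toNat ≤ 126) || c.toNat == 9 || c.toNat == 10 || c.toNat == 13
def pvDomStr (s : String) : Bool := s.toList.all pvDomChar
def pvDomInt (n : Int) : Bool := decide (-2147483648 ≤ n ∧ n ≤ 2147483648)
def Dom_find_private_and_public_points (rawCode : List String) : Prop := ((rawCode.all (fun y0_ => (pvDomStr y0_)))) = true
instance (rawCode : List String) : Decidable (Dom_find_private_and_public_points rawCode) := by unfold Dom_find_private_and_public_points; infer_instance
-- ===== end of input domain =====

-- B scans the lines backwards keeping the first hit per label and breaks once both are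
-- found, instead of A's full forward overwrite scan (objective: alternative decomposition).

-- ===== PORT A =====
-- forward scan over (index, line), later matches overwrite earlier ones
def find_private_and_public_points (rawCode : List String) : Option Int × Option Int :=
  (PySem.List.enumerate rawCode).foldl
    (fun st p =>
      let line := PySem.Str.strip p.2
      if line = "private:" then (some p.1, st.2)
      else if line = "public:" then (st.1, some p.1)
      else st)
    (none, none)

-- ===== PORT B =====
-- backward scan: keep the first hit for each label, break once both are found
def pvGoB : List (Int × String) → Option Int → Option Int → Option Int × Option Int
  | [], priv, pub => (priv, pub)
  | (i, s) :: rest, priv, pub =>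
    let line := PySem.Str.strip s
    let st :=
      if line = "private:" then ((if priv = none then some i else priv), pub)
      else if line = "public:" then (priv, (if pub = none then some i else pub))
      else (priv, pub)
    if st.1 ≠ none ∧ st.2 ≠ none then st
    else pvGoB rest st.1 st.2

def find_private_and_public_points_alt (rawCode : List String) : Option Int × Option Int :=
  pvGoB (PySem.List.enumerate rawCode).reverse none none

-- ===== PRECONDITION & SPEC =====
def Spec_find_private_and_public_points (rawCode : List String) (out : Option Int × Option Int) : Prop := out = find_private_and_public_points_alt rawCode
instance (rawCode : List String) (out : Option Int × Option Int) : Decidable (Spec_find_private_and_public_points rawCode out) := by unfold Spec_find_private_and_public_points; infer_instance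

-- ===== CLAIM (what is proved, stated in full; the proofs are below) =====
def Claim_equal_find_private_and_public_points : Prop := ∀ (rawCode : List String), Dom_find_private_and_public_points rawCode → Spec_find_private_and_public_points rawCode (find_private_and_public_points rawCode)

-- ===== LEMMAS AND PROOFS =====

-- first "private:" / "public:" match (elif shape) in a list of (index, line) pairs
def pvFirstP : List (Int × String) → Option Int
  | [] => none
  | (i, s) :: r => if PySem.Str.strip s = "private:" then some i else pvFirstP r

def pvFirstQ : List (Int × String) → Option Int
  | [] => none
  | (i, s) :: r =>
    if PySem.Str.strip s = "private:" then pvFirstQ r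
    else if PySem.Str.strip s = "public:" then some i else pvFirstQ r

theorem pvFirstP_append (l : List (Int × String)) (e : Int × String) :
    pvFirstP (l ++ [e]) =
      (pvFirstP l).or (if PySem.Str.strip e.2 = "private:" then some e.1 else none) := by
  induction l with
  | nil => simp [pvFirstP]
  | cons h t ih => obtain ⟨i, s⟩ := h; simp [pvFirstP, ih]; split_ifs <;> simp

theorem pvFirstQ_append (l : List (Int × String)) (e : Int × String) :
    pvFirstQ (l ++ [e]) =
      (pvFirstQ l).or
        (if PySem.Str.strip e.2 = "private:" then none
         else if PySem.Str.strip e.2 = "public:" then some e.1 else none) := by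
  induction l with
  | nil => simp [pvFirstQ]
  | cons h t ih => obtain ⟨i, s⟩ := h; simp [pvFirstQ, ih]; split_ifs <;> simp

theorem pvGoB_eq (l : List (Int × String)) :
    ∀ (priv pub : Option Int),
      pvGoB l priv pub = (priv.or (pvFirstP l), pub.or (pvFirstQ l)) := by
  induction l with
  | nil => intro priv pub; simp [pvGoB, pvFirstP, pvFirstQ]
  | cons h t ih =>
    intro priv pub
    obtain ⟨i, s⟩ := h
    simp only [pvGoB, pvFirstP, pvFirstQ]
    rcases priv with _ | a <;> rcases pub with _ | b <;>
      split_ifs <;> simp_all [pvGoB, ih]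

theorem foldA_eq (l : List (Int × String)) :
    ∀ (st : Option Int × Option Int),
      l.foldl
        (fun st p =>
          let line := PySem.Str.strip p.2
          if line = "private:" then (some p.1, st.2)
          else if line = "public:" then (st.1, some p.1)
          else st) st
      = ((pvFirstP l.reverse).or st.1, (pvFirstQ l.reverse).or st.2) := by
  induction l with
  | nil => intro st; simp [pvFirstP, pvFirstQ]
  | cons h t ih =>
    intro st
    obtain ⟨i, s⟩ := h
    simp only [List.foldl_cons, ih, List.reverse_cons, pvFirstP_append, pvFirstQ_append]
    split_ifs <;> simp [Option.or_assoc]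

-- ===== VERDICT (by name: the statement is the Claim_ definition above) =====
theorem find_private_and_public_points_spec : Claim_equal_find_private_and_public_points := by
  intro rawCode _
  unfold Spec_find_private_and_public_points
  unfold find_private_and_public_points find_private_and_public_points_alt
  rw [foldA_eq, pvGoB_eq]
  simp
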